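-- pv_equiv track=rewrite | github.com/baixiaobest/BiologyApp | Utilities.py | extract_possible_proteins_from_protein_sequence
-- ===== SOURCE A (Python) =====
-- from collections import deque
--
-- def extract_possible_proteins_from_protein_sequence(seq):
--     '''
--     Given protein sequence, return possible protein sequence.
--     :param seq: protein string. Start codon is M and stop codon is *
--     :return: List of possible protein in (protein string, start index into original sequence).
--     index is 0-indexed.
--     '''
--     possible_proteins = []
--     # (protein sequence string, index into the sequence)
--     curr = ("", -1)
--     stack = deque()
--
--     for i in range(len(seq)):
--         # Start codon encountered
--         if seq[i] == 'M':
--             if not curr[0] == "":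
--                 stack.append(curr)
--             curr = ("M", i)
--
--         # End codon encountered
--         elif seq[i] == '*':
--             if curr[0] == "":
--                 continue
--             curr = (curr[0] + "*",  curr[1])
--             possible_proteins.append(curr)
--             while len(stack) > 0:
--                 top = stack.pop()
--                 curr = (top[0] + curr[0], top[1])
--                 possible_proteins.append(curr)
--
--             curr = ("", -1)
--         # Non-start or non-stop codon encountered,
--         # and we have encountered start codon before.
--         elif curr[0] != "":
--             curr = (curr[0] + seq[i], curr[1])
--
--     return possible_proteins
-- ===== SOURCE B (Python) =====
-- def extract_possible_proteins_from_protein_sequence(seq):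
--     '''
--     Given protein sequence, return possible protein sequence.
--     :param seq: protein string. Start codon is M and stop codon is *
--     :return: List of possible protein in (protein string, start index into original sequence).
--     index is 0-indexed.
--     '''
--     res = []
--     start = 0  # start of the current inter-stop segment
--     for j, c in enumerate(seq):
--         if c == '*':
--             # every 'M' in the segment opens a protein ending at this stop;
--             # emitted with start indices descending (innermost protein first)
--             for i in range(j - 1, start - 1, -1):
--                 if seq[i] == 'M':
--                     res.append((seq[i:j + 1], i))
--             start = j + 1
--     return res
-- ===== Notes on version B (the rewrite author's own statement) =====
-- stated objective: alternative
-- what changed: A maintains a reset-on-stop stack of partially built protein strings grown character by character; B instead splits the sequence at stop codons and, at each stop, scans the finished segment backwards once, slicing each start-to-stop protein directly out of the original string.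
import Mathlib
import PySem

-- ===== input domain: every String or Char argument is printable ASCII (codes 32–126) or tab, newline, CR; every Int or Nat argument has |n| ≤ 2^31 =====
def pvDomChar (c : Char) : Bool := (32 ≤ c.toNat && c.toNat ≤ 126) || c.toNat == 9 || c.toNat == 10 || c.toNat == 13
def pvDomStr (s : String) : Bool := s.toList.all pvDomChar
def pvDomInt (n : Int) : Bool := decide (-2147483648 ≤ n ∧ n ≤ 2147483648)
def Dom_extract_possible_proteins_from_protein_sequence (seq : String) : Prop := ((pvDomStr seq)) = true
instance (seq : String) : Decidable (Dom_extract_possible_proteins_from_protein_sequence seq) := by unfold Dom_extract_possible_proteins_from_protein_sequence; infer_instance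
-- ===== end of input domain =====

-- B replaces A's reset-on-stop stack of incrementally grown strings by a split-at-stop-codon
-- scan: at each stop codon it walks the finished segment backwards once, slicing each protein
-- out of seq directly (objective: alternative; same return value, no speed claim).

-- ===== PORT A =====
-- Python's deque used as a stack (append/pop at the right) is ported as a Lean list with the
-- TOP AT THE HEAD: push = cons, pop = take the head; order of popped elements is identical.
def pvDrainA (acc : List (String × Int)) (curr : String × Int) : List (String × Int) → List (String × Int)
  | [] => acc
  | top :: rest =>
    let c2 := (top.1 ++ curr.1, top.2)
    pvDrainA (acc ++ [c2]) c2 rest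

-- 'for i in range(len(seq))' with 'seq[i]' reads the characters in order: ported as structural
-- recursion over the character list carrying the running index i (exact for in-range access).
def pvLoopA (acc : List (String × Int)) (curr : String × Int) (stack : List (String × Int)) (i : Int) : List Char → List (String × Int)
  | [] => acc
  | c :: rest =>
    if c = 'M' then
      pvLoopA acc ("M", i) (if curr.1 = "" then stack else curr :: stack) (i + 1) rest
    else if c = '*' then
      if curr.1 = "" then
        pvLoopA acc curr stack (i + 1) rest
      else
        let c1 := (curr.1.push '*', curr.2)
        pvLoopA (pvDrainA (acc ++ [c1]) c1 stack) ("", -1) [] (i + 1) rest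
    else if curr.1 ≠ "" then
      pvLoopA acc (curr.1.push c, curr.2) stack (i + 1) rest
    else
      pvLoopA acc curr stack (i + 1) rest

def extract_possible_proteins_from_protein_sequence (seq : String) : List (String × Int) :=
  pvLoopA [] ("", -1) [] 0 seq.toList

-- ===== PORT B =====
-- inner loop 'for i in range(j-1, start-1, -1): if seq[i]=="M": res.append((seq[i:j+1], i))'
def pvEmitB (seq : List Char) (res : List (String × Int)) (start j : Int) : List (String × Int) :=
  (PySem.List.pyRange (j - 1) (start - 1) (-1)).foldl
    (fun res i =>
      if PySem.List.pyGetD seq i ' ' = 'M' then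
        res ++ [(String.ofList (PySem.List.slice seq (some i) (some (j + 1))), i)]
      else res)
    res

-- 'for j, c in enumerate(seq)' as structural recursion over the characters carrying j
def pvLoopB (seq : List Char) (res : List (String × Int)) (start j : Int) : List Char → List (String × Int)
  | [] => res
  | c :: rest =>
    if c = '*' then
      pvLoopB seq (pvEmitB seq res start j) (j + 1) (j + 1) rest
    else
      pvLoopB seq res start (j + 1) rest

def extract_possible_proteins_from_protein_sequence_alt (seq : String) : List (String × Int) :=
  pvLoopB seq.toList [] 0 0 seq.toList

-- ===== PRECONDITION & SPEC =====
def Spec_extract_possible_proteins_from_protein_sequence (seq : String) (out : List (String × Int)) : Prop := out = extract_possible_proteins_from_protein_sequence_alt seq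
instance (seq : String) (out : List (String × Int)) : Decidable (Spec_extract_possible_proteins_from_protein_sequence seq out) := by unfold Spec_extract_possible_proteins_from_protein_sequence; infer_instance

-- ===== CLAIM (what is proved, stated in full; the proofs are below) =====
def Claim_equal_extract_possible_proteins_from_protein_sequence : Prop := ∀ (seq : String), Dom_extract_possible_proteins_from_protein_sequence seq → Spec_extract_possible_proteins_from_protein_sequence seq (extract_possible_proteins_from_protein_sequence seq)

-- ===== LEMMAS AND PROOFS =====

-- the ascending list of 'M'-positions of a (star-free) segment
def pvMs (w : List Char) : List Nat :=
  (List.range w.length).filter (fun m => w.getD m ' ' = 'M')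

-- the proteins a stop at position k + w.length emits, innermost (largest start) first
def pvEmit (w : List Char) (k : Int) : List (String × Int) :=
  (pvMs w).reverse.map (fun m => (String.ofList (w.drop m ++ ['*']), k + (m : Int)))

-- reference: segment-splitting recursion both ports are reduced to
def pvSpec : List Char → Int → List Char → List (String × Int)
  | _, _, [] => []
  | w, k, c :: s =>
    if c = '*' then pvEmit w k ++ pvSpec [] (k + w.length + 1) s
    else pvSpec (w ++ [c]) k s

-- A's (curr, stack) after scanning a star-free segment w whose first char has index k
def pvSegGo (curr : String × Int) (stk : List (String × Int)) (i : Int) : List Char → (String × Int) × List (String × Int)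
  | [] => (curr, stk)
  | c :: w =>
    if c = 'M' then pvSegGo ("M", i) (if curr.1 = "" then stk else curr :: stk) (i + 1) w
    else if curr.1 ≠ "" then pvSegGo (curr.1.push c, curr.2) stk (i + 1) w
    else pvSegGo curr stk (i + 1) w

-- closed form of the stack for the descending position list r (r = (pvMs w).reverse)
def pvStk (w : List Char) (k : Int) : List Nat → List (String × Int)
  | [] => []
  | [_] => []
  | top :: a :: r => (String.ofList ((w.drop a).take (top - a)), k + (a : Int)) :: pvStk w k (a :: r)

theorem pvSegGo_snoc (curr : String × Int) (stk : List (String × Int)) (i : Int) (w : List Char) (c : Char) :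
    pvSegGo curr stk i (w ++ [c]) =
      (if c = 'M' then
        (("M", i + (w.length : Int)),
          if (pvSegGo curr stk i w).1.1 = "" then (pvSegGo curr stk i w).2
          else (pvSegGo curr stk i w).1 :: (pvSegGo curr stk i w).2)
      else if (pvSegGo curr stk i w).1.1 ≠ "" then
        (((pvSegGo curr stk i w).1.1.push c, (pvSegGo curr stk i w).1.2), (pvSegGo curr stk i w).2)
      else pvSegGo curr stk i w) := by
  induction w generalizing curr stk i with
  | nil => simp [pvSegGo]
  | cons a w ih =>
    simp only [List.cons_append, pvSegGo]
    have heq : i + 1 + (w.length : Int) = i + ((w.length : Int) + 1) := by ring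
    split_ifs with h1 h2 <;> rw [ih] <;> split_ifs <;> simp_all

theorem pvMs_snoc (w : List Char) (c : Char) :
    pvMs (w ++ [c]) = if c = 'M' then pvMs w ++ [w.length] else pvMs w := by
  unfold pvMs
  have hlen : (w ++ [c]).length = w.length + 1 := by simp
  rw [hlen, List.range_succ, List.filter_append]
  have h1 : (List.range w.length).filter (fun m => decide ((w ++ [c]).getD m ' ' = 'M')) =
      (List.range w.length).filter (fun m => decide (w.getD m ' ' = 'M')) := by
    apply List.filter_congr
    intro m hm
    rw [List.mem_range] at hm
    rw [List.getD_append w [c] ' ' m hm]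
  have h2 : (w ++ [c]).getD w.length ' ' = c := by simp [List.getD_eq_getElem?_getD]
  rw [h1]
  by_cases hc : c = 'M'
  · simp [List.filter, hc, List.getD_eq_getElem?_getD]
  · simp [List.filter, hc]

theorem pvMs_lt (w : List Char) (m : Nat) (h : m ∈ pvMs w) : m < w.length := by
  unfold pvMs at h
  rw [List.mem_filter, List.mem_range] at h
  exact h.1

theorem pvStk_congr (w : List Char) (c : Char) (k : Int) (r : List Nat)
    (h : ∀ x ∈ r, x ≤ w.length) : pvStk (w ++ [c]) k r = pvStk w k r := by
  induction r with
  | nil => rfl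
  | cons a r ih =>
    cases r with
    | nil => rfl
    | cons b r' =>
      simp only [pvStk]
      rw [ih (fun x hx => h x (List.mem_cons_of_mem _ hx))]
      have hb : b ≤ w.length := h b (by simp)
      rw [List.drop_append_of_le_length hb]
      have : (w.drop b ++ [c]).take (a - b) = (w.drop b).take (a - b) := by
        apply List.take_append_of_le_length
        have ha : a ≤ w.length := h a (by simp)
        simp
        omega
      rw [this]

-- closed-form characterisation of A's segment state
theorem pvOfList_ne_empty (l : List Char) (h : l ≠ []) : String.ofList l ≠ "" := by
  intro he
  apply h
  have := congrArg String.toList he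
  simpa using this

theorem pvSegGo_closed (w : List Char) (k : Int) (hstar : '*' ∉ w) :
    pvSegGo ("", -1) [] k w =
      (match (pvMs w).reverse with
       | [] => (("", -1), [])
       | last :: _ => ((String.ofList (w.drop last), k + (last : Int)), pvStk w k (pvMs w).reverse)) := by
  induction w using List.reverseRecOn with
  | nil => simp [pvSegGo, pvMs]
  | append_singleton w c ih =>
    have hstar' : '*' ∉ w := fun h => hstar (List.mem_append_left _ h)
    have hc : c ≠ '*' := fun h => hstar (by simp [h])
    have hbound : ∀ x ∈ (pvMs w).reverse, x ≤ w.length := by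
      intro x hx
      exact le_of_lt (pvMs_lt w x (List.mem_reverse.mp hx))
    rw [pvSegGo_snoc, ih hstar', pvMs_snoc]
    by_cases hM : c = 'M'
    · rw [if_pos hM, if_pos hM]
      have hms : (pvMs w ++ [w.length]).reverse = w.length :: (pvMs w).reverse := by simp
      rw [hms]
      cases hrev : (pvMs w).reverse with
      | nil =>
        subst hM
        have hdrop : (w ++ ['M']).drop w.length = ['M'] := by simp
        have hMstr : String.ofList ['M'] = "M" := rfl
        simp [pvStk, hdrop, hMstr]
      | cons last rest =>
        have hlt : last < w.length := pvMs_lt w last (List.mem_reverse.mp (hrev ▸ List.mem_cons_self))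
        have hne : String.ofList (w.drop last) ≠ "" := by
          apply pvOfList_ne_empty
          intro hnil
          have := congrArg List.length hnil
          simp at this
          omega
        simp only [hne, pvStk]
        have e1 : ((w ++ [c]).drop last).take (w.length - last) = w.drop last := by
          rw [List.drop_append_of_le_length (le_of_lt hlt)]
          rw [List.take_append_of_le_length (by simp)]
          apply List.take_of_length_le
          simp
        have e2 : pvStk (w ++ [c]) k (last :: rest) = pvStk w k (last :: rest) := by
          apply pvStk_congr
          intro x hx
          exact hbound x (hrev ▸ hx)
        subst hM
        have hdrop : (w ++ ['M']).drop w.length = ['M'] := by simp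
        have hMstr : String.ofList ['M'] = "M" := rfl
        simp [e1, e2, hdrop, hMstr]
    · rw [if_neg hM, if_neg hM]
      cases hrev : (pvMs w).reverse with
      | nil => simp
      | cons last rest =>
        have hlt : last < w.length := pvMs_lt w last (List.mem_reverse.mp (hrev ▸ List.mem_cons_self))
        have hne : String.ofList (w.drop last) ≠ "" := by
          apply pvOfList_ne_empty
          intro hnil
          have := congrArg List.length hnil
          simp at this
          omega
        simp only [hne, ne_eq, not_false_eq_true, if_pos]
        have e1 : (String.ofList (w.drop last)).push c = String.ofList ((w ++ [c]).drop last) := by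
          apply String.ext_iff.mpr
          simp [List.drop_append_of_le_length (le_of_lt hlt)]
        have e2 : pvStk (w ++ [c]) k (last :: rest) = pvStk w k (last :: rest) := by
          apply pvStk_congr
          intro x hx
          exact hbound x (hrev ▸ hx)
        simp [e1, e2]

theorem pvDrainA_stk (w : List Char) (k : Int) (acc : List (String × Int)) (top : Nat) (d : List Nat)
    (hchain : (top :: d).Pairwise (· > ·)) (htop : top ≤ w.length) :
    pvDrainA (acc ++ [(String.ofList (w.drop top ++ ['*']), k + (top : Int))])
      (String.ofList (w.drop top ++ ['*']), k + (top : Int)) (pvStk w k (top :: d)) =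
      acc ++ (top :: d).map (fun m => (String.ofList (w.drop m ++ ['*']), k + (m : Int))) := by
  induction d generalizing acc top with
  | nil => simp [pvStk, pvDrainA]
  | cons a d' ih =>
    have hat : a < top := (List.pairwise_cons.mp hchain).1 a (by simp)
    have hc2 : String.ofList ((w.drop a).take (top - a)) ++ String.ofList (w.drop top ++ ['*']) =
        String.ofList (w.drop a ++ ['*']) := by
      apply String.ext_iff.mpr
      simp only [String.toList_append, String.toList_ofList]
      rw [← List.append_assoc]
      congr 1
      have hdd : w.drop top = (w.drop a).drop (top - a) := by
        rw [List.drop_drop]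
        congr 1
        omega
      rw [hdd, List.take_append_drop]
    simp only [pvStk, pvDrainA, hc2]
    have := ih (acc := acc ++ [(String.ofList (w.drop top ++ ['*']), k + (top : Int))]) (top := a)
      ((List.pairwise_cons.mp hchain).2) (le_trans (le_of_lt hat) htop)
    rw [this]
    simp

-- A's loop computes pvSpec
theorem pvLoopA_spec (s : List Char) (w : List Char) (k : Int) (acc : List (String × Int))
    (hstar : '*' ∉ w) :
    pvLoopA acc (pvSegGo ("", -1) [] k w).1 (pvSegGo ("", -1) [] k w).2 (k + w.length) s =
      acc ++ pvSpec w k s := by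
  induction s generalizing w k acc with
  | nil => simp [pvLoopA, pvSpec]
  | cons c s ih =>
    have harr : k + (w.length : Int) + 1 = k + (((w.length + 1 : Nat)) : Int) := by push_cast; ring
    by_cases hM : c = 'M'
    · subst hM
      simp only [pvLoopA]
      have hs : pvSegGo ("", -1) [] k (w ++ ['M']) =
          (("M", k + (w.length : Int)),
            if (pvSegGo ("", -1) [] k w).1.1 = "" then (pvSegGo ("", -1) [] k w).2
            else (pvSegGo ("", -1) [] k w).1 :: (pvSegGo ("", -1) [] k w).2) := by
        rw [pvSegGo_snoc]
        simp
      have hIH := ih (w := w ++ ['M']) k acc (by simp [hstar])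
      rw [hs] at hIH
      simp only [List.length_append, List.length_cons, List.length_nil] at hIH
      rw [← harr] at hIH
      rw [hIH]
      simp [pvSpec]
    · by_cases hS : c = '*'
      · subst hS
        simp only [pvLoopA, if_neg hM]
        have hclosed := pvSegGo_closed w k hstar
        rcases hrev : (pvMs w).reverse with _ | ⟨last, rest⟩
        · rw [hrev] at hclosed
          simp only at hclosed
          rw [hclosed]
          have hemit : pvEmit w k = [] := by simp [pvEmit, hrev]
          have hIH := ih (w := []) (k + (w.length : Int) + 1) acc (by simp)
          simp only [pvSegGo, List.length_nil, Nat.cast_zero, add_zero] at hIH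
          rw [hIH]
          simp [pvSpec, hemit]
        · rw [hrev] at hclosed
          simp only at hclosed
          rw [hclosed]
          have hlt : last < w.length := pvMs_lt w last (List.mem_reverse.mp (hrev ▸ List.mem_cons_self))
          have hne : String.ofList (w.drop last) ≠ "" := by
            apply pvOfList_ne_empty
            intro hnil
            have := congrArg List.length hnil
            simp at this
            omega
          rw [if_neg hne]
          have hpush : (String.ofList (w.drop last)).push '*' = String.ofList (w.drop last ++ ['*']) := by
            apply String.ext_iff.mpr
            simp
          have hpw : (last :: rest).Pairwise (· > ·) := by
            rw [← hrev]
            rw [List.pairwise_reverse]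
            exact List.Pairwise.filter _ List.pairwise_lt_range
          have hdrain := pvDrainA_stk w k acc last rest hpw (le_of_lt hlt)
          have hemit : pvEmit w k =
              (last :: rest).map (fun m => (String.ofList (w.drop m ++ ['*']), k + (m : Int))) := by
            simp [pvEmit, hrev]
          simp only [hpush]
          rw [hdrain, ← hemit]
          have hIH := ih (w := []) (k + (w.length : Int) + 1) (acc ++ pvEmit w k) (by simp)
          simp only [pvSegGo, List.length_nil, Nat.cast_zero, add_zero] at hIH
          rw [hIH]
          simp [pvSpec]
      · simp only [pvLoopA, if_neg hM, if_neg hS]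
        have hs := pvSegGo_snoc ("", -1) [] k w c
        rw [if_neg hM] at hs
        have hIH := ih (w := w ++ [c]) k acc (by
          intro hmem
          rcases List.mem_append.mp hmem with h | h
          · exact hstar h
          · simp at h
            exact hS h.symm)
        simp only [List.length_append, List.length_cons, List.length_nil] at hIH
        rw [← harr] at hIH
        have hspec : pvSpec w k (c :: s) = pvSpec (w ++ [c]) k s := by
          simp [pvSpec, hS]
        rw [hspec]
        by_cases hcur : (pvSegGo ("", -1) [] k w).1.1 = ""
        · rw [if_neg (by simp [hcur])]
          rw [if_neg (by simp [hcur])] at hs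
          rw [hs] at hIH
          exact hIH
        · rw [if_pos (by simp [hcur])]
          rw [if_pos (by simp [hcur])] at hs
          rw [hs] at hIH
          exact hIH

-- B's stop-handler computes pvEmit
theorem pvEmitB_spec (seq : List Char) (res : List (String × Int)) (w s' : List Char) (k : Int)
    (hk : 0 ≤ k) (hdrop : seq.drop k.toNat = w ++ '*' :: s') :
    pvEmitB seq res k (k + w.length) = res ++ pvEmit w k := by
  have hkK : k = (k.toNat : Int) := (Int.toNat_of_nonneg hk).symm
  unfold pvEmitB
  have h1 : (k + (w.length : Int) - 1 - (k - 1)).toNat = w.length := by omega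
  rw [PySem.List.pyRange_neg_one, h1, List.foldl_map]
  have hfold := PySem.List.foldl_append_if
    (fun (t : Nat) => decide (PySem.List.pyGetD seq (k + (w.length : Int) - 1 - (t : Int)) ' ' = 'M'))
    (fun (t : Nat) => (String.ofList (PySem.List.slice seq (some (k + (w.length : Int) - 1 - (t : Int)))
      (some (k + (w.length : Int) + 1))), k + (w.length : Int) - 1 - (t : Int)))
    (List.range w.length) res
  simp only [decide_eq_true_eq] at hfold
  rw [hfold]
  have hrr : (List.range w.length).reverse = (List.range w.length).map (fun t => w.length - 1 - t) := by
    rw [List.range_eq_range', List.reverse_range']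
    simp [List.range_eq_range']
  have hemit : pvEmit w k =
      ((List.range w.length).filter
          ((fun m => decide (w.getD m ' ' = 'M')) ∘ (fun t => w.length - 1 - t))).map
        ((fun m => (String.ofList (w.drop m ++ ['*']), k + (m : Int))) ∘ (fun t => w.length - 1 - t)) := by
    unfold pvEmit pvMs
    rw [← List.filter_reverse, hrr, List.filter_map, List.map_map]
  rw [hemit]
  congr 1
  have hidx : ∀ t, t < w.length →
      k + (w.length : Int) - 1 - (t : Int) = (((k.toNat + (w.length - 1 - t) : Nat)) : Int) := by
    intro t ht
    push_cast
    omega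
  have hget : ∀ t, t < w.length →
      PySem.List.pyGetD seq (k + (w.length : Int) - 1 - (t : Int)) ' ' = w.getD (w.length - 1 - t) ' ' := by
    intro t ht
    rw [hidx t ht, PySem.List.pyGetD_natCast, List.getD_eq_getElem?_getD, List.getD_eq_getElem?_getD]
    rw [← List.getElem?_drop, hdrop, List.getElem?_append_left (by omega)]
  have hslice : ∀ t, t < w.length →
      PySem.List.slice seq (some (k + (w.length : Int) - 1 - (t : Int))) (some (k + (w.length : Int) + 1)) =
        w.drop (w.length - 1 - t) ++ ['*'] := by
    intro t ht
    have h2 : k + (w.length : Int) + 1 = ((k.toNat + w.length + 1 : Nat) : Int) := by push_cast; omega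
    rw [hidx t ht, h2, PySem.List.slice_natCast]
    have h3 : seq.drop (k.toNat + (w.length - 1 - t)) = w.drop (w.length - 1 - t) ++ '*' :: s' := by
      rw [← List.drop_drop, hdrop, List.drop_append_of_le_length (by omega)]
    rw [h3, List.take_append]
    have h4 : (w.drop (w.length - 1 - t)).take (k.toNat + w.length + 1 - (k.toNat + (w.length - 1 - t))) =
        w.drop (w.length - 1 - t) := by
      apply List.take_of_length_le
      simp
      omega
    have h5 : k.toNat + w.length + 1 - (k.toNat + (w.length - 1 - t)) - (w.drop (w.length - 1 - t)).length = 1 := by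
      simp
      omega
    rw [h4, h5]
    simp
  have hfc : (List.range w.length).filter
        (fun (t : Nat) => decide (PySem.List.pyGetD seq (k + (w.length : Int) - 1 - (t : Int)) ' ' = 'M')) =
      (List.range w.length).filter
        ((fun m => decide (w.getD m ' ' = 'M')) ∘ (fun t => w.length - 1 - t)) := by
    apply List.filter_congr
    intro t htm
    rw [List.mem_range] at htm
    simp only [Function.comp_apply, hget t htm]
  rw [← hfc]
  apply List.map_congr_left
  intro t htm
  have ht : t < w.length := List.mem_range.mp (List.mem_filter.mp htm).1
  simp only [Function.comp_apply]
  rw [hslice t ht, hidx t ht]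
  congr 1
  push_cast
  omega

-- B's loop computes pvSpec
theorem pvLoopB_spec (seq : List Char) (s : List Char) (w : List Char) (k : Int)
    (res : List (String × Int)) (hk : 0 ≤ k) (hdrop : seq.drop k.toNat = w ++ s) :
    pvLoopB seq res k (k + w.length) s = res ++ pvSpec w k s := by
  induction s generalizing w k res with
  | nil => simp [pvLoopB, pvSpec]
  | cons c s ih =>
    by_cases hS : c = '*'
    · subst hS
      simp only [pvLoopB]
      rw [pvEmitB_spec seq res w s k hk hdrop]
      have hk' : (0 : Int) ≤ k + (w.length : Int) + 1 := by omega
      have hdrop' : seq.drop (k + (w.length : Int) + 1).toNat = ([] : List Char) ++ s := by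
        have h2 : (k + (w.length : Int) + 1).toNat = k.toNat + (w.length + 1) := by omega
        rw [h2, ← List.drop_drop, hdrop]
        simp
      have hIH := ih (w := []) (k + (w.length : Int) + 1) (res ++ pvEmit w k) hk' hdrop'
      simp only [List.length_nil, Nat.cast_zero, add_zero] at hIH
      rw [hIH]
      simp [pvSpec]
    · simp only [pvLoopB, if_neg hS]
      have hdrop' : seq.drop k.toNat = (w ++ [c]) ++ s := by
        rw [hdrop]
        simp
      have hIH := ih (w := w ++ [c]) k res hk hdrop'
      rw [List.length_append, List.length_cons, List.length_nil] at hIH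
      have harr2 : k + (((w.length + 1 : Nat)) : Int) = k + (w.length : Int) + 1 := by push_cast; ring
      rw [harr2] at hIH
      rw [hIH]
      simp [pvSpec, hS]

-- ===== VERDICT (by name: the statement is the Claim_ definition above) =====
theorem extract_possible_proteins_from_protein_sequence_spec : Claim_equal_extract_possible_proteins_from_protein_sequence := by
  intro seq _
  unfold Spec_extract_possible_proteins_from_protein_sequence
  unfold extract_possible_proteins_from_protein_sequence extract_possible_proteins_from_protein_sequence_alt
  have hA := pvLoopA_spec seq.toList [] 0 [] (by simp)
  have hB := pvLoopB_spec seq.toList seq.toList [] 0 [] le_rfl (by simp)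
  simpa [pvSegGo] using hA.trans hB.symm
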